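-- pv_equiv track=rewrite | github.com/Freshjelly/zonepoint | fx-discord-news/src/nlp/extract.py | extract_currency_pairs
-- ===== SOURCE A (Python) =====
-- from typing import Dict, List, Set
--
-- def extract_currency_pairs(currencies: List[str]) -> List[str]:
--     """Generate currency pairs from extracted currencies."""
--     if not currencies:
--         return []
--
--     # Major pairs (with USD)
--     major_bases = ["EUR", "GBP", "AUD", "NZD", "USD", "CAD", "CHF"]
--     pairs = []
--
--     for currency in currencies:
--         if currency == "USD":
--             # USD as quote currency
--             for base in major_bases:
--                 if base != "USD" and base in currencies:
--                     pairs.append(f"{base}USD")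
--         elif currency in major_bases:
--             # USD as base currency
--             pairs.append(f"USD{currency}")
--
--         # JPY crosses
--         if currency == "JPY":
--             for base in ["EUR", "GBP", "AUD", "NZD", "CAD", "CHF"]:
--                 if base in currencies:
--                     pairs.append(f"{base}JPY")
--
--     # Remove duplicates and sort
--     return sorted(list(set(pairs)))
-- ===== SOURCE B (Python) =====
-- def extract_currency_pairs(currencies):
--     """Generate currency pairs from extracted currencies."""
--     s = set(currencies)
--     cross = ["EUR", "GBP", "AUD", "NZD", "CAD", "CHF"]
--     present = [b for b in cross if b in s]
--     pairs = []
--     if "USD" in s: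
--         pairs = pairs + [b + "USD" for b in present]
--     pairs = pairs + ["USD" + b for b in present]
--     if "JPY" in s:
--         pairs = pairs + [b + "JPY" for b in present]
--     return sorted(set(pairs))
-- ===== Notes on version B (the rewrite author's own statement) =====
-- stated objective: alternative
-- what changed: Instead of scanning the input list and classifying each occurrence (with nested rescans of the list), B builds the membership set once and iterates over the fixed six candidate bases, adding each template pair whose currencies are present; the loop over the input disappears.
import Mathlib
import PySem

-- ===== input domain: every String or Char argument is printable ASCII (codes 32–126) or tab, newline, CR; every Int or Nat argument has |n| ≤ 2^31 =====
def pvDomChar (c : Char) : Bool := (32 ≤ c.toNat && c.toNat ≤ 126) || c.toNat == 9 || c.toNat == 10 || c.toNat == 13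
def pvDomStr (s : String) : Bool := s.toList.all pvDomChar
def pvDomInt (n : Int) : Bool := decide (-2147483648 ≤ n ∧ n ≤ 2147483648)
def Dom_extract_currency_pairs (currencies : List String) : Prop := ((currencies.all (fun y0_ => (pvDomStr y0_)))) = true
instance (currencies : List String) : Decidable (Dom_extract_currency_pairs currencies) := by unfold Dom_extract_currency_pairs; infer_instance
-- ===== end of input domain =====

-- B replaces A's scan-and-classify loop over the input by a fixed iteration over the
-- six candidate base currencies against a membership set (alternative decomposition).

-- ===== PORT A =====
def extract_currency_pairs (currencies : List String) : List String :=
  if currencies = [] then []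
  else
    let major_bases : List String := ["EUR", "GBP", "AUD", "NZD", "USD", "CAD", "CHF"]
    let pairs : List String :=
      currencies.foldl (fun pairs currency =>
        let pairs :=
          if currency = "USD" then
            major_bases.foldl (fun p base =>
              if base ≠ "USD" ∧ base ∈ currencies then p ++ [base ++ "USD"] else p) pairs
          else if currency ∈ major_bases then
            pairs ++ ["USD" ++ currency]
          else pairs
        if currency = "JPY" then
          (["EUR", "GBP", "AUD", "NZD", "CAD", "CHF"] : List String).foldl
            (fun p base => if base ∈ currencies then p ++ [base ++ "JPY"] else p) pairs
        else pairs) []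
    PySem.List.sorted (PySem.Set.ofList pairs) (fun x => x) false

-- ===== PORT B =====
def extract_currency_pairs_alt (currencies : List String) : List String :=
  let s : PySem.Set String := PySem.Set.ofList currencies
  let cross : List String := ["EUR", "GBP", "AUD", "NZD", "CAD", "CHF"]
  let present : List String := cross.filter (fun b => decide (b ∈ s))
  let pairs : List String := []
  let pairs := if "USD" ∈ s then pairs ++ present.map (fun b => b ++ "USD") else pairs
  let pairs := pairs ++ present.map (fun b => "USD" ++ b)
  let pairs := if "JPY" ∈ s then pairs ++ present.map (fun b => b ++ "JPY") else pairs
  PySem.List.sorted (PySem.Set.ofList pairs) (fun x => x) false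

-- ===== PRECONDITION & SPEC =====
def Spec_extract_currency_pairs (currencies : List String) (out : List String) : Prop := out = extract_currency_pairs_alt currencies
instance (currencies : List String) (out : List String) : Decidable (Spec_extract_currency_pairs currencies out) := by unfold Spec_extract_currency_pairs; infer_instance

-- ===== CLAIM (what is proved, stated in full; the proofs are below) =====
def Claim_equal_extract_currency_pairs : Prop := ∀ (currencies : List String), Dom_extract_currency_pairs currencies → Spec_extract_currency_pairs currencies (extract_currency_pairs currencies)

-- ===== LEMMAS AND PROOFS =====

-- membership through a conditional-append fold (A's inner loops)
theorem mem_foldl_app (cond : String → Prop) [DecidablePred cond] (g : String → String)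
    (L : List String) : ∀ (acc : List String) (x : String),
    (x ∈ L.foldl (fun p b => if cond b then p ++ [g b] else p) acc) ↔
      x ∈ acc ∨ ∃ b ∈ L, cond b ∧ x = g b := by
  induction L with
  | nil => simp
  | cons c cs ih =>
    intro acc x
    simp only [List.foldl_cons, ih]
    by_cases h : cond c <;> simp [h] <;> tauto

-- the common membership characterisation
def Psi (currencies : List String) (x : String) : Prop :=
  ("USD" ∈ currencies ∧ ∃ b ∈ (["EUR","GBP","AUD","NZD","CAD","CHF"] : List String), b ∈ currencies ∧ x = b ++ "USD") ∨
  (∃ b ∈ (["EUR","GBP","AUD","NZD","CAD","CHF"] : List String), b ∈ currencies ∧ x = "USD" ++ b) ∨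
  ("JPY" ∈ currencies ∧ ∃ b ∈ (["EUR","GBP","AUD","NZD","CAD","CHF"] : List String), b ∈ currencies ∧ x = b ++ "JPY")

-- what one outer-loop step of A contributes, per scanned currency c
def genA (currencies : List String) (c x : String) : Prop :=
  (c = "USD" ∧ ∃ b ∈ (["EUR", "GBP", "AUD", "NZD", "USD", "CAD", "CHF"] : List String),
      (b ≠ "USD" ∧ b ∈ currencies) ∧ x = b ++ "USD") ∨
  (c ≠ "USD" ∧ c ∈ (["EUR", "GBP", "AUD", "NZD", "USD", "CAD", "CHF"] : List String) ∧ x = "USD" ++ c) ∨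
  (c = "JPY" ∧ ∃ b ∈ (["EUR", "GBP", "AUD", "NZD", "CAD", "CHF"] : List String), b ∈ currencies ∧ x = b ++ "JPY")

theorem cross_to_major (b : String)
    (hb : b ∈ (["EUR", "GBP", "AUD", "NZD", "CAD", "CHF"] : List String)) :
    b ∈ (["EUR", "GBP", "AUD", "NZD", "USD", "CAD", "CHF"] : List String) ∧ b ≠ "USD" := by
  simp only [List.mem_cons, List.not_mem_nil, or_false] at hb
  rcases hb with rfl | rfl | rfl | rfl | rfl | rfl <;> exact ⟨by decide, by decide⟩

theorem major_to_cross (b : String)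
    (hb : b ∈ (["EUR", "GBP", "AUD", "NZD", "USD", "CAD", "CHF"] : List String))
    (hne : b ≠ "USD") :
    b ∈ (["EUR", "GBP", "AUD", "NZD", "CAD", "CHF"] : List String) := by
  simp only [List.mem_cons, List.not_mem_nil, or_false] at hb
  rcases hb with rfl | rfl | rfl | rfl | rfl | rfl | rfl <;> first | decide | exact absurd rfl hne

-- membership after one step of A's outer loop
theorem mem_stepA (currencies acc : List String) (c x : String) :
    (x ∈ (if c = "JPY" then
          (["EUR", "GBP", "AUD", "NZD", "CAD", "CHF"] : List String).foldl
            (fun p base => if base ∈ currencies then p ++ [base ++ "JPY"] else p)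
            (if c = "USD" then
              (["EUR", "GBP", "AUD", "NZD", "USD", "CAD", "CHF"] : List String).foldl (fun p base =>
                if base ≠ "USD" ∧ base ∈ currencies then p ++ [base ++ "USD"] else p) acc
            else if c ∈ (["EUR", "GBP", "AUD", "NZD", "USD", "CAD", "CHF"] : List String) then
              acc ++ ["USD" ++ c]
            else acc)
        else
          (if c = "USD" then
            (["EUR", "GBP", "AUD", "NZD", "USD", "CAD", "CHF"] : List String).foldl (fun p base =>
              if base ≠ "USD" ∧ base ∈ currencies then p ++ [base ++ "USD"] else p) acc
          else if c ∈ (["EUR", "GBP", "AUD", "NZD", "USD", "CAD", "CHF"] : List String) then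
            acc ++ ["USD" ++ c]
          else acc))) ↔ x ∈ acc ∨ genA currencies c x := by
  by_cases hU : c = "USD"
  · subst hU
    rw [if_neg (by decide : ¬ ("USD" : String) = "JPY"), if_pos rfl,
      mem_foldl_app (fun base => base ≠ "USD" ∧ base ∈ currencies) (fun base => base ++ "USD")]
    simp only [genA]
    simp
  · by_cases hJ : c = "JPY"
    · subst hJ
      rw [if_pos rfl, if_neg (by decide : ¬ ("JPY" : String) = "USD"),
        if_neg (by decide : ("JPY" : String) ∉ (["EUR", "GBP", "AUD", "NZD", "USD", "CAD", "CHF"] : List String)),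
        mem_foldl_app (fun base => base ∈ currencies) (fun base => base ++ "JPY")]
      simp only [genA]
      simp
    · rw [if_neg hJ, if_neg hU]
      by_cases hM : c ∈ (["EUR", "GBP", "AUD", "NZD", "USD", "CAD", "CHF"] : List String)
      · rw [if_pos hM]
        simp only [genA, List.mem_append, List.mem_singleton]
        simp [hU, hJ, hM]
      · rw [if_neg hM]
        simp only [genA]
        simp [hU, hJ, hM]

theorem mem_outerA (currencies : List String) (cs : List String) :
    ∀ (acc : List String) (x : String),
    (x ∈ cs.foldl (fun pairs currency =>
        if currency = "JPY" then
          (["EUR", "GBP", "AUD", "NZD", "CAD", "CHF"] : List String).foldl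
            (fun p base => if base ∈ currencies then p ++ [base ++ "JPY"] else p)
            (if currency = "USD" then
              (["EUR", "GBP", "AUD", "NZD", "USD", "CAD", "CHF"] : List String).foldl (fun p base =>
                if base ≠ "USD" ∧ base ∈ currencies then p ++ [base ++ "USD"] else p) pairs
            else if currency ∈ (["EUR", "GBP", "AUD", "NZD", "USD", "CAD", "CHF"] : List String) then
              pairs ++ ["USD" ++ currency]
            else pairs)
        else
          (if currency = "USD" then
            (["EUR", "GBP", "AUD", "NZD", "USD", "CAD", "CHF"] : List String).foldl (fun p base =>
              if base ≠ "USD" ∧ base ∈ currencies then p ++ [base ++ "USD"] else p) pairs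
          else if currency ∈ (["EUR", "GBP", "AUD", "NZD", "USD", "CAD", "CHF"] : List String) then
            pairs ++ ["USD" ++ currency]
          else pairs)) acc) ↔
      x ∈ acc ∨ ∃ c ∈ cs, genA currencies c x := by
  induction cs with
  | nil => simp
  | cons c rest ih =>
    intro acc x
    rw [List.foldl_cons, ih, mem_stepA]
    simp only [List.mem_cons]
    constructor
    · rintro ((h | h) | ⟨d, hd, hg⟩)
      · exact Or.inl h
      · exact Or.inr ⟨c, Or.inl rfl, h⟩
      · exact Or.inr ⟨d, Or.inr hd, hg⟩
    · rintro (h | ⟨d, (rfl | hd), hg⟩)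
      · exact Or.inl (Or.inl h)
      · exact Or.inl (Or.inr hg)
      · exact Or.inr ⟨d, hd, hg⟩

theorem exists_genA_iff_Psi (currencies : List String) (x : String) :
    (∃ c ∈ currencies, genA currencies c x) ↔ Psi currencies x := by
  constructor
  · rintro ⟨c, hc, (⟨rfl, b, hb, ⟨hbne, hbcur⟩, rfl⟩ | ⟨hne, hcm, rfl⟩ | ⟨rfl, b, hb, hbcur, rfl⟩)⟩
    · exact Or.inl ⟨hc, b, major_to_cross b hb hbne, hbcur, rfl⟩
    · exact Or.inr (Or.inl ⟨c, major_to_cross c hcm hne, hc, rfl⟩)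
    · exact Or.inr (Or.inr ⟨hc, b, hb, hbcur, rfl⟩)
  · rintro (⟨hU, b, hb, hbc, rfl⟩ | ⟨b, hb, hbc, rfl⟩ | ⟨hJ, b, hb, hbc, rfl⟩)
    · exact ⟨"USD", hU, Or.inl ⟨rfl, b, (cross_to_major b hb).1, ⟨(cross_to_major b hb).2, hbc⟩, rfl⟩⟩
    · exact ⟨b, hbc, Or.inr (Or.inl ⟨(cross_to_major b hb).2, (cross_to_major b hb).1, rfl⟩)⟩
    · exact ⟨"JPY", hJ, Or.inr (Or.inr ⟨rfl, b, hb, hbc, rfl⟩)⟩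

-- membership in B's pairs list
theorem mem_pairsB (currencies : List String) (x : String) :
    (x ∈ (if "JPY" ∈ PySem.Set.ofList currencies then
        ((if "USD" ∈ PySem.Set.ofList currencies then
            ([] : List String) ++ ((["EUR", "GBP", "AUD", "NZD", "CAD", "CHF"] : List String).filter
              (fun b => decide (b ∈ PySem.Set.ofList currencies))).map (fun b => b ++ "USD")
          else ([] : List String)) ++
          ((["EUR", "GBP", "AUD", "NZD", "CAD", "CHF"] : List String).filter
            (fun b => decide (b ∈ PySem.Set.ofList currencies))).map (fun b => "USD" ++ b)) ++
          ((["EUR", "GBP", "AUD", "NZD", "CAD", "CHF"] : List String).filter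
            (fun b => decide (b ∈ PySem.Set.ofList currencies))).map (fun b => b ++ "JPY")
      else
        (if "USD" ∈ PySem.Set.ofList currencies then
            ([] : List String) ++ ((["EUR", "GBP", "AUD", "NZD", "CAD", "CHF"] : List String).filter
              (fun b => decide (b ∈ PySem.Set.ofList currencies))).map (fun b => b ++ "USD")
          else ([] : List String)) ++
          ((["EUR", "GBP", "AUD", "NZD", "CAD", "CHF"] : List String).filter
            (fun b => decide (b ∈ PySem.Set.ofList currencies))).map (fun b => "USD" ++ b))) ↔
      Psi currencies x := by
  by_cases hJ : "JPY" ∈ PySem.Set.ofList currencies <;>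
    by_cases hU : "USD" ∈ PySem.Set.ofList currencies <;>
    [rw [if_pos hJ, if_pos hU]; rw [if_pos hJ, if_neg hU];
     rw [if_neg hJ, if_pos hU]; rw [if_neg hJ, if_neg hU]] <;>
    rw [PySem.Set.mem_ofList] at hJ hU <;>
    simp only [List.mem_append, List.mem_map, List.mem_filter, List.not_mem_nil, false_or,
      decide_eq_true_eq, PySem.Set.mem_ofList, Psi] <;>
    constructor
  · rintro ((⟨b, ⟨hb, hbc⟩, rfl⟩ | ⟨b, ⟨hb, hbc⟩, rfl⟩) | ⟨b, ⟨hb, hbc⟩, rfl⟩)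
    · exact Or.inl ⟨hU, b, hb, hbc, rfl⟩
    · exact Or.inr (Or.inl ⟨b, hb, hbc, rfl⟩)
    · exact Or.inr (Or.inr ⟨hJ, b, hb, hbc, rfl⟩)
  · rintro (⟨_, b, hb, hbc, rfl⟩ | ⟨b, hb, hbc, rfl⟩ | ⟨_, b, hb, hbc, rfl⟩)
    · exact Or.inl (Or.inl ⟨b, ⟨hb, hbc⟩, rfl⟩)
    · exact Or.inl (Or.inr ⟨b, ⟨hb, hbc⟩, rfl⟩)
    · exact Or.inr ⟨b, ⟨hb, hbc⟩, rfl⟩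
  · rintro (⟨b, ⟨hb, hbc⟩, rfl⟩ | ⟨b, ⟨hb, hbc⟩, rfl⟩)
    · exact Or.inr (Or.inl ⟨b, hb, hbc, rfl⟩)
    · exact Or.inr (Or.inr ⟨hJ, b, hb, hbc, rfl⟩)
  · rintro (⟨hU', _⟩ | ⟨b, hb, hbc, rfl⟩ | ⟨_, b, hb, hbc, rfl⟩)
    · exact absurd hU' hU
    · exact Or.inl ⟨b, ⟨hb, hbc⟩, rfl⟩
    · exact Or.inr ⟨b, ⟨hb, hbc⟩, rfl⟩
  · rintro (⟨b, ⟨hb, hbc⟩, rfl⟩ | ⟨b, ⟨hb, hbc⟩, rfl⟩)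
    · exact Or.inl ⟨hU, b, hb, hbc, rfl⟩
    · exact Or.inr (Or.inl ⟨b, hb, hbc, rfl⟩)
  · rintro (⟨_, b, hb, hbc, rfl⟩ | ⟨b, hb, hbc, rfl⟩ | ⟨hJ', _⟩)
    · exact Or.inl ⟨b, ⟨hb, hbc⟩, rfl⟩
    · exact Or.inr ⟨b, ⟨hb, hbc⟩, rfl⟩
    · exact absurd hJ' hJ
  · rintro ⟨b, ⟨hb, hbc⟩, rfl⟩
    exact Or.inr (Or.inl ⟨b, hb, hbc, rfl⟩)
  · rintro (⟨hU', _⟩ | ⟨b, hb, hbc, rfl⟩ | ⟨hJ', _⟩)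
    · exact absurd hU' hU
    · exact ⟨b, ⟨hb, hbc⟩, rfl⟩
    · exact absurd hJ' hJ

-- ===== VERDICT (by name: the statement is the Claim_ definition above) =====
theorem extract_currency_pairs_spec : Claim_equal_extract_currency_pairs := by
  intro currencies _
  unfold Spec_extract_currency_pairs extract_currency_pairs extract_currency_pairs_alt
  by_cases hc : currencies = []
  · subst hc; decide
  · rw [if_neg hc]
    refine (PySem.List.sorted_id_eq_sorted_id_iff_perm _ _).mpr ?_
    rw [List.perm_ext_iff_of_nodup (PySem.Set.nodup_ofList _) (PySem.Set.nodup_ofList _)]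
    intro a
    rw [PySem.Set.mem_ofList, PySem.Set.mem_ofList, mem_outerA, mem_pairsB]
    simp only [List.not_mem_nil, false_or]
    exact exists_genA_iff_Psi currencies a
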